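-- pv_equiv track=rewrite | github.com/Chihi-Sahati/Unified-OSS-Framework | src/unified_oss/fcaps/fault/ai_alarm_analysis.py | _build_evidence
-- ===== SOURCE A (Python) =====
-- from typing import Dict, List, Optional, Tuple, Any
--
-- def _build_evidence(alarms: List[Dict]) -> Dict:
--     """Build evidence dictionary for Bayesian inference"""
--     evidence = {}
--
--     severity_counts = {'critical': 0, 'major': 0, 'minor': 0}
--     for alarm in alarms:
--         severity = alarm.get('severity', 'minor').lower()
--         if severity in severity_counts:
--             severity_counts[severity] += 1
--
--     evidence['critical_count'] = severity_counts['critical']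
--     evidence['major_count'] = severity_counts['major']
--     evidence['minor_count'] = severity_counts['minor']
--
--     return evidence
-- ===== SOURCE B (Python) =====
-- def _build_evidence(alarms):
--     """Build evidence dictionary for Bayesian inference"""
--     return {
--         'critical_count': sum(1 for a in alarms if a.get('severity', 'minor').lower() == 'critical'),
--         'major_count': sum(1 for a in alarms if a.get('severity', 'minor').lower() == 'major'),
--         'minor_count': sum(1 for a in alarms if a.get('severity', 'minor').lower() == 'minor'),
--     }
-- ===== Notes on version B (the rewrite author's own statement) =====
-- stated objective: simpler
-- what changed: Replaces the accumulating severity_counts dict and single mutating pass with a dict literal whose three fields are computed directly by independent filtering sums.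
import Mathlib
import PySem

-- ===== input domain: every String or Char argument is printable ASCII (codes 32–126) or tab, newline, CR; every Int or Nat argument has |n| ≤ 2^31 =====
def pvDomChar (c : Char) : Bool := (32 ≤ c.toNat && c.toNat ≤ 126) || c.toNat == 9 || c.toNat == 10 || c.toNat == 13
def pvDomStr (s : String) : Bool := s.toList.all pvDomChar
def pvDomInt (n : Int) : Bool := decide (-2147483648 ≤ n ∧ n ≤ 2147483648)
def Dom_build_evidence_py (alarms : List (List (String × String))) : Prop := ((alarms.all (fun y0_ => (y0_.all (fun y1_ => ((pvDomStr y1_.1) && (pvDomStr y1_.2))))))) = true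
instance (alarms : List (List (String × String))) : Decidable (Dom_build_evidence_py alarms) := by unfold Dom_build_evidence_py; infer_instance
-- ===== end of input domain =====

-- B replaces A's single accumulating pass over a mutable severity_counts dict by a dict
-- literal whose three fields are independent filtering counts (objective: simpler).

-- ===== PORT A =====
-- alarm.get('severity', 'minor').lower(), shared by both Pythons verbatim
def pvSev (alarm : List (String × String)) : String :=
  PySem.Str.lower ((PySem.Dict.ofList alarm).getD "severity" "minor")

def build_evidence_py (alarms : List (List (String × String))) : List (String × Int) :=
  let sc0 : PySem.Dict String Int := PySem.Dict.ofList [("critical", 0), ("major", 0), ("minor", 0)]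
  let sc := alarms.foldl (fun sc alarm =>
      let severity := pvSev alarm
      if sc.contains severity then sc.modify severity 0 (· + 1) else sc) sc0
  (((((PySem.Dict.empty : PySem.Dict String Int).insert "critical_count" (sc.getD "critical" 0)).insert
      "major_count" (sc.getD "major" 0)).insert
      "minor_count" (sc.getD "minor" 0))).items

-- ===== PORT B =====
def build_evidence_py_alt (alarms : List (List (String × String))) : List (String × Int) :=
  [("critical_count", (alarms.countP (fun a => pvSev a == "critical") : Int)),
   ("major_count", (alarms.countP (fun a => pvSev a == "major") : Int)),
   ("minor_count", (alarms.countP (fun a => pvSev a == "minor") : Int))]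

-- ===== PRECONDITION & SPEC =====
def Spec_build_evidence_py (alarms : List (List (String × String))) (out : List (String × Int)) : Prop := out = build_evidence_py_alt alarms
instance (alarms : List (List (String × String))) (out : List (String × Int)) : Decidable (Spec_build_evidence_py alarms out) := by unfold Spec_build_evidence_py; infer_instance

-- ===== CLAIM (what is proved, stated in full; the proofs are below) =====
def Claim_equal_build_evidence_py : Prop := ∀ (alarms : List (List (String × String))), Dom_build_evidence_py alarms → Spec_build_evidence_py alarms (build_evidence_py alarms)

-- ===== LEMMAS AND PROOFS =====

-- Invariant of A's counting loop: a key already present counts its matching alarms.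
theorem pv_foldl_sev (l : List (List (String × String))) (sc : PySem.Dict String Int)
    (k : String) (hk : sc.contains k = true) :
    (l.foldl (fun d a =>
        let s := pvSev a
        if d.contains s then d.modify s 0 (· + 1) else d) sc).getD k 0
      = sc.getD k 0 + (l.countP (fun a => pvSev a == k) : Int) := by
  induction l generalizing sc with
  | nil => simp
  | cons a l ih =>
    simp only [List.foldl_cons, List.countP_cons]
    by_cases h : sc.contains (pvSev a) = true
    · rw [if_pos h, ih _ (by simp [PySem.Dict.contains_modify, hk])]
      rw [PySem.Dict.getD_modify]
      rcases eq_or_ne k (pvSev a) with hek | hek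
      · subst hek
        simp only [beq_self_eq_true, if_true]
        push_cast
        ring
      · rw [if_neg hek]
        have hb : (pvSev a == k) = false := by simp [Ne.symm hek]
        simp [hb]
    · rw [if_neg h, ih _ hk]
      have hne : pvSev a ≠ k := fun he => h (he ▸ hk)
      simp [hne]

-- ===== VERDICT (by name: the statement is the Claim_ definition above) =====
theorem build_evidence_py_spec : Claim_equal_build_evidence_py := by
  intro alarms _
  unfold Spec_build_evidence_py build_evidence_py build_evidence_py_alt
  simp only []
  rw [pv_foldl_sev _ _ "critical" (by decide), pv_foldl_sev _ _ "major" (by decide),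
      pv_foldl_sev _ _ "minor" (by decide)]
  simp [PySem.Dict.insert, PySem.Dict.empty, PySem.Dict.contains,
        PySem.Dict.ofList, PySem.Dict.getD, PySem.Dict.get?]
  decide
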